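-- pv_equiv track=rewrite | github.com/heiseish/Dawn-Language | src/modelling/transformer/transformer.py | _get_max_suffix_repeat_times
-- ===== SOURCE A (Python) =====
-- from typing import Dict, Tuple, Any, Callable, List, Optional
--
-- def _get_max_suffix_repeat_times(tokens: List[str], max_len: int) -> int:
--     ''' Retrun max suffix repeat times
--     Args:
--         tokens (Lis[str]): list of toke s
--         max_len (int) : max length of the tokens
--     Returns:
--         Max repeat
--     '''
--     detect_len = min(max_len, len(tokens))
--     next = [-1] * detect_len
--     k = -1
--     for i in range(1, detect_len):
--         while k >= 0 and tokens[len(tokens) - i - 1] != tokens[len(tokens) - k -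
--                                                                2]:
--             k = next[k]
--         if tokens[len(tokens) - i - 1] == tokens[len(tokens) - k - 2]:
--             k += 1
--         next[i] = k
--     max_repeat = 1
--     for i in range(2, detect_len):
--         if next[i] >= 0 and (i + 1) % (i - next[i]) == 0:
--             max_repeat = max(max_repeat, (i + 1) // (i - next[i]))
--     return max_repeat
-- ===== SOURCE B (Python) =====
-- from typing import List
--
--
-- def _smallest_period(s: List[str], m: int) -> int:
--     # smallest p in 1..m-1 such that s[j] == s[j+p] for all 0 <= j < m-p; else m
--     for p in range(1, m):
--         if all(s[j] == s[j + p] for j in range(m - p)):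
--             return p
--     return m
--
--
-- def _get_max_suffix_repeat_times(tokens: List[str], max_len: int) -> int:
--     detect_len = min(max_len, len(tokens))
--     s = tokens[::-1][:detect_len]
--     max_repeat = 1
--     for m in range(3, detect_len + 1):
--         p = _smallest_period(s, m)
--         if m % p == 0:
--             max_repeat = max(max_repeat, m // p)
--     return max_repeat
-- ===== Notes on version B (the rewrite author's own statement) =====
-- stated objective: simpler
-- what changed: Replaces the KMP failure-table construction and its border-length formula with an explicit reversed-prefix list and a direct brute-force smallest-period scan per prefix length.
import Mathlib
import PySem

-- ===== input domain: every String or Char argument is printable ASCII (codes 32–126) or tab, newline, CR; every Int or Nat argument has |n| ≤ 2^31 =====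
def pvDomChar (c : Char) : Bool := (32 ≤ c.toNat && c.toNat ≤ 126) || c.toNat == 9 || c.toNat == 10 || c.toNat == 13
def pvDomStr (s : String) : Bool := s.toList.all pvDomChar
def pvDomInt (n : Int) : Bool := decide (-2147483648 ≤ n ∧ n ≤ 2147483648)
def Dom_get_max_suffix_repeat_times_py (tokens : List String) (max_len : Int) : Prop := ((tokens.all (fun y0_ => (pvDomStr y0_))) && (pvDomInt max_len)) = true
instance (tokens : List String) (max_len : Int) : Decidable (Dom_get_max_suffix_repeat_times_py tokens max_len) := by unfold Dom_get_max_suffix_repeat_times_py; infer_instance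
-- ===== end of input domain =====

-- B replaces A's KMP failure table with an explicit reversed-prefix list and a direct
-- brute-force smallest-period scan per prefix length (simpler, not faster).


-- ===== PORT A =====
-- tokens[x] for an index that is always in range on A's traces (0 ≤ x < len(tokens)); exact there.
def pvTok (tokens : List String) (x : Int) : String := tokens.getD x.toNat ""

-- the inner 'while k >= 0 and tokens[...] != tokens[...]: k = next[k]' loop.
-- It terminates because next[k] < k holds on every trace of A; the 'next[k] < k' test
-- only guards termination (its else-branch is unreachable on A's states).
def pvWhileA (tokens : List String) (next : List Int) (i k : Int) : Int :=
  if k ≥ 0 ∧ pvTok tokens ((tokens.length : Int) - i - 1) ≠ pvTok tokens ((tokens.length : Int) - k - 2) then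
    if _h : next.getD k.toNat (-1) < k then pvWhileA tokens next i (next.getD k.toNat (-1))
    else next.getD k.toNat (-1)
  else k
termination_by (k + 1).toNat
decreasing_by omega

-- one iteration of A's failure-table 'for i in range(1, detect_len)' loop
def pvStepA (tokens : List String) (st : List Int × Int) (i : Int) : List Int × Int :=
  let n : Int := tokens.length
  let k1 := pvWhileA tokens st.1 i st.2
  let k2 := if pvTok tokens (n - i - 1) = pvTok tokens (n - k1 - 2) then k1 + 1 else k1
  (st.1.set i.toNat k2, k2)

def get_max_suffix_repeat_times_py (tokens : List String) (max_len : Int) : Int :=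
  let n : Int := tokens.length
  let detect_len : Int := min max_len n
  let st := (PySem.List.pyRange 1 detect_len 1).foldl (pvStepA tokens)
    (List.replicate detect_len.toNat (-1), -1)
  (PySem.List.pyRange 2 detect_len 1).foldl
    (fun max_repeat i =>
      let ni := st.1.getD i.toNat (-1)
      if ni ≥ 0 ∧ PySem.Int.mod (i + 1) (i - ni) = 0 then
        max max_repeat (PySem.Int.floordiv (i + 1) (i - ni))
      else max_repeat)
    1

-- ===== PORT B =====
-- '_smallest_period(s, m)': first p in 1..m-1 with s[j] == s[j+p] for all j < m-p, else m.
def pvSmallestPeriod (s : List String) (m p : Int) : Int :=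
  if p < m then
    if (PySem.List.pyRange 0 (m - p) 1).all
        (fun j => s.getD j.toNat "" == s.getD (j + p).toNat "") then p
    else pvSmallestPeriod s m (p + 1)
  else m
termination_by (m - p).toNat
decreasing_by omega

def get_max_suffix_repeat_times_py_alt (tokens : List String) (max_len : Int) : Int :=
  let detect_len : Int := min max_len (tokens.length : Int)
  -- s = tokens[::-1][:detect_len]  (slice? with step -1 is total: the step is not 0)
  let s := PySem.List.slice ((PySem.List.slice? tokens none none (-1)).getD []) none (some detect_len)
  (PySem.List.pyRange 3 (detect_len + 1) 1).foldl
    (fun max_repeat m =>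
      let p := pvSmallestPeriod s m 1
      if PySem.Int.mod m p = 0 then max max_repeat (PySem.Int.floordiv m p) else max_repeat)
    1

-- ===== PRECONDITION & SPEC =====
def Spec_get_max_suffix_repeat_times_py (tokens : List String) (max_len : Int) (out : Int) : Prop := out = get_max_suffix_repeat_times_py_alt tokens max_len
instance (tokens : List String) (max_len : Int) (out : Int) : Decidable (Spec_get_max_suffix_repeat_times_py tokens max_len out) := by unfold Spec_get_max_suffix_repeat_times_py; infer_instance

-- ===== CLAIM (what is proved, stated in full; the proofs are below) =====
def Claim_equal_get_max_suffix_repeat_times_py : Prop := ∀ (tokens : List String) (max_len : Int), Dom_get_max_suffix_repeat_times_py tokens max_len → Spec_get_max_suffix_repeat_times_py tokens max_len (get_max_suffix_repeat_times_py tokens max_len)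

-- ===== LEMMAS AND PROOFS =====
-- math layer: borders of the reversed suffix
def pvF (t : List String) (j : Nat) : String := pvTok t ((t.length : Int) - j - 1)

def pvBrd (t : List String) (m b : Nat) : Bool :=
  decide (b < m) && (List.range b).all (fun j => pvF t j == pvF t (m - b + j))

def pvMaxB (t : List String) (m : Nat) : Nat :=
  Nat.findGreatest (fun b => pvBrd t m b = true) (m - 1)

theorem pvBrd_iff (t : List String) (m b : Nat) :
    pvBrd t m b = true ↔ b < m ∧ ∀ j < b, pvF t j = pvF t (m - b + j) := by
  simp [pvBrd]

theorem pvBrd_zero (t : List String) {m : Nat} (h : 0 < m) : pvBrd t m 0 = true := by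
  simp [pvBrd_iff, h]

theorem pvBrd_lt {t : List String} {m b : Nat} (h : pvBrd t m b = true) : b < m :=
  ((pvBrd_iff t m b).1 h).1

theorem pvBrd_down {t : List String} {m b b' : Nat} (hb : pvBrd t m b = true)
    (hb' : pvBrd t m b' = true) (h : b' < b) : pvBrd t b b' = true := by
  rw [pvBrd_iff] at *
  refine ⟨h, fun j hj => ?_⟩
  have e1 := hb'.2 j hj
  have e2 := hb.2 (b - b' + j) (by omega)
  have e3 : m - b + (b - b' + j) = m - b' + j := by have := hb.1; omega
  rw [e3] at e2
  rw [e1, ← e2]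

theorem pvBrd_comp {t : List String} {m b b' : Nat} (hb : pvBrd t m b = true)
    (hb' : pvBrd t b b' = true) : pvBrd t m b' = true := by
  rw [pvBrd_iff] at *
  refine ⟨by omega, fun j hj => ?_⟩
  have e1 := hb'.2 j hj
  have e2 := hb.2 (b - b' + j) (by omega)
  have e3 : m - b + (b - b' + j) = m - b' + j := by omega
  rw [e3] at e2
  rw [e1, e2]

theorem pvBrd_succ (t : List String) (m b : Nat) :
    pvBrd t (m + 1) (b + 1) = true ↔ (pvBrd t m b = true ∧ pvF t b = pvF t m) := by
  rw [pvBrd_iff, pvBrd_iff]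
  constructor
  · rintro ⟨h1, h2⟩
    have hb : b < m := by omega
    refine ⟨⟨hb, fun j hj => ?_⟩, ?_⟩
    · have := h2 j (by omega)
      have e : m + 1 - (b + 1) + j = m - b + j := by omega
      rwa [e] at this
    · have := h2 b (by omega)
      have e : m + 1 - (b + 1) + b = m := by omega
      rwa [e] at this
  · rintro ⟨⟨h1, h2⟩, h3⟩
    refine ⟨by omega, fun j hj => ?_⟩
    rcases Nat.lt_succ_iff_lt_or_eq.1 hj with hj' | rfl
    · have := h2 j hj'
      have e : m + 1 - (b + 1) + j = m - b + j := by omega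
      rwa [e]
    · have e : m + 1 - (j + 1) + j = m := by omega
      rwa [e]

theorem pvMaxB_brd (t : List String) {m : Nat} (h : 0 < m) :
    pvBrd t m (pvMaxB t m) = true := by
  exact Nat.findGreatest_spec (P := fun b => pvBrd t m b = true) (Nat.zero_le _) (pvBrd_zero t h)

theorem pvMaxB_le {t : List String} {m b : Nat} (hb : pvBrd t m b = true) : b ≤ pvMaxB t m :=
  Nat.le_findGreatest (by have := pvBrd_lt hb; omega) hb

theorem pvMaxB_lt (t : List String) {m : Nat} (h : 0 < m) : pvMaxB t m < m :=
  pvBrd_lt (pvMaxB_brd t h)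

theorem pvMaxB_one (t : List String) : pvMaxB t 1 = 0 := by
  simp [pvMaxB, Nat.findGreatest]

theorem pvTok_shift (t : List String) (k : Int) (hk : -1 ≤ k) :
    pvTok t ((t.length : Int) - k - 2) = pvF t ((k + 1).toNat) := by
  unfold pvF; congr 1; omega

theorem whileA_spec (t : List String) (next : List Int) (c : Nat)
    (Hnext : ∀ j : Nat, j < c → next.getD j (-1) = (pvMaxB t (j + 1) : Int) - 1) :
    ∀ (N : Nat) (k : Int), (k + 1).toNat ≤ N → -1 ≤ k →
    pvBrd t c ((k + 1).toNat) = true →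
    (∀ b : Nat, pvBrd t c b = true → pvF t b = pvF t c → (b : Int) ≤ k + 1) →
    (-1 ≤ pvWhileA t next (c : Int) k ∧
     pvBrd t c ((pvWhileA t next (c : Int) k + 1).toNat) = true ∧
     (∀ b : Nat, pvBrd t c b = true → pvF t b = pvF t c →
        (b : Int) ≤ pvWhileA t next (c : Int) k + 1) ∧
     (pvWhileA t next (c : Int) k < 0 ∨
        pvF t c = pvF t ((pvWhileA t next (c : Int) k + 1).toNat))) := by
  intro N
  induction N with
  | zero =>
    intro k hN hk hbrd hmax
    have hk1 : k = -1 := by omega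
    subst hk1
    rw [pvWhileA, if_neg (by intro h; omega)]
    exact ⟨by omega, hbrd, hmax, Or.inl (by omega)⟩
  | succ N ih =>
    intro k hN hk hbrd hmax
    rw [pvWhileA]
    by_cases hcond : k ≥ 0 ∧ pvTok t ((t.length : Int) - (c : Int) - 1) ≠ pvTok t ((t.length : Int) - k - 2)
    · rw [if_pos hcond]
      obtain ⟨hk0, hne⟩ := hcond
      have htoki : pvTok t ((t.length : Int) - (c : Int) - 1) = pvF t c := rfl
      rw [htoki, pvTok_shift t k hk] at hne
      have hblt : (k + 1).toNat < c := pvBrd_lt hbrd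
      have hktoNat : k.toNat + 1 = (k + 1).toNat := by omega
      have hknext : next.getD k.toNat (-1) = (pvMaxB t ((k + 1).toNat) : Int) - 1 := by
        rw [Hnext k.toNat (by omega), hktoNat]
      have hmb_lt : pvMaxB t ((k + 1).toNat) < (k + 1).toNat := pvMaxB_lt t (by omega)
      have hguard : next.getD k.toNat (-1) < k := by rw [hknext]; omega
      rw [dif_pos hguard]
      have e : ((next.getD k.toNat (-1)) + 1).toNat = pvMaxB t ((k + 1).toNat) := by
        rw [hknext]; omega
      refine ih (next.getD k.toNat (-1)) (by rw [e]; omega) (by rw [hknext]; omega) ?_ ?_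
      · rw [e]; exact pvBrd_comp hbrd (pvMaxB_brd t (by omega))
      · intro b' hb' hfb'
        have h1 := hmax b' hb' hfb'
        have hb'le : b' ≤ (k + 1).toNat := by omega
        rcases Nat.lt_or_eq_of_le hb'le with hlt | heq
        · have hbb := pvBrd_down hbrd hb' hlt
          have := pvMaxB_le hbb
          rw [hknext]; omega
        · exfalso; apply hne; rw [← heq, hfb']
    · rw [if_neg hcond]
      refine ⟨hk, hbrd, hmax, ?_⟩
      by_cases hk0 : k < 0
      · exact Or.inl hk0
      · right
        push Not at hcond
        have := hcond (by omega)
        have htoki : pvTok t ((t.length : Int) - (c : Int) - 1) = pvF t c := rfl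
        rwa [htoki, pvTok_shift t k hk] at this

def InvA (t : List String) (d c : Nat) (st : List Int × Int) : Prop :=
  st.1.length = d ∧ st.2 = (pvMaxB t c : Int) - 1 ∧
  ∀ j : Nat, j < d → st.1.getD j (-1) = if j < c then (pvMaxB t (j + 1) : Int) - 1 else -1

theorem stepA_inv (t : List String) (d c : Nat) (hc1 : 1 ≤ c) (hcd : c < d)
    (st : List Int × Int) (h : InvA t d c st) :
    InvA t d (c + 1) (pvStepA t st (c : Int)) := by
  obtain ⟨hlen, hk2, hj⟩ := h
  have Hnext : ∀ j : Nat, j < c → st.1.getD j (-1) = (pvMaxB t (j + 1) : Int) - 1 := by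
    intro j hjc
    rw [hj j (by omega), if_pos hjc]
  have hmaxc := pvMaxB_brd t (show 0 < c by omega)
  have hk : -1 ≤ st.2 := by rw [hk2]; omega
  have e0 : (st.2 + 1).toNat = pvMaxB t c := by rw [hk2]; omega
  obtain ⟨hr1, hr2, hr3, hr4⟩ :=
    whileA_spec t st.1 c Hnext ((st.2 + 1).toNat) st.2 (le_refl _) hk
      (by rw [e0]; exact hmaxc)
      (by intro b hb _; have := pvMaxB_le hb; rw [hk2]; omega)
  set r := pvWhileA t st.1 (c : Int) st.2 with hrdef
  have htoki : pvTok t ((t.length : Int) - (c : Int) - 1) = pvF t c := rfl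
  have hcnd : (pvTok t ((t.length : Int) - (c : Int) - 1) = pvTok t ((t.length : Int) - r - 2))
      ↔ pvF t c = pvF t ((r + 1).toNat) := by rw [htoki, pvTok_shift t r hr1]
  have hk2eq : (if pvTok t ((t.length : Int) - (c : Int) - 1) = pvTok t ((t.length : Int) - r - 2)
      then r + 1 else r) = (pvMaxB t (c + 1) : Int) - 1 := by
    by_cases hmatch : pvF t c = pvF t ((r + 1).toNat)
    · rw [if_pos (hcnd.2 hmatch)]
      have hle1 : (r + 1).toNat + 1 ≤ pvMaxB t (c + 1) :=
        pvMaxB_le ((pvBrd_succ t c ((r + 1).toNat)).2 ⟨hr2, hmatch.symm⟩)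
      have hle2 : pvMaxB t (c + 1) ≤ (r + 1).toNat + 1 := by
        have hB := pvMaxB_brd t (show 0 < c + 1 by omega)
        cases hBv : pvMaxB t (c + 1) with
        | zero => omega
        | succ b'' =>
          rw [hBv] at hB
          obtain ⟨hb'', hf⟩ := (pvBrd_succ t c b'').1 hB
          have := hr3 b'' hb'' hf
          omega
      omega
    · rw [if_neg (fun hcc => hmatch (hcnd.1 hcc))]
      have hrneg : r = -1 := by
        rcases hr4 with h0 | h0
        · omega
        · exact absurd h0 hmatch
      have hB0 : pvMaxB t (c + 1) = 0 := by
        have hB := pvMaxB_brd t (show 0 < c + 1 by omega)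
        cases hBv : pvMaxB t (c + 1) with
        | zero => rfl
        | succ b'' =>
          rw [hBv] at hB
          obtain ⟨hb'', hf⟩ := (pvBrd_succ t c b'').1 hB
          have := hr3 b'' hb'' hf
          have hb''0 : b'' = 0 := by omega
          rw [hb''0] at hf
          exfalso
          apply hmatch
          rw [hrneg]
          simpa using hf.symm
      rw [hB0, hrneg]; simp
  refine ⟨by simp [pvStepA, hlen], ?_, ?_⟩
  · simpa [pvStepA] using hk2eq
  · intro j hjd
    simp only [pvStepA, Int.toNat_natCast]
    by_cases hjc : j = c
    · subst hjc
      rw [List.getD_eq_getElem?_getD, List.getElem?_set_self (by simp [hlen]; omega),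
        if_pos (show j < j + 1 by omega)]
      simp only [Option.getD_some]
      rw [← hrdef]
      exact hk2eq
    · rw [List.getD_eq_getElem?_getD, List.getElem?_set_ne (by simpa using fun hh => hjc hh.symm),
        ← List.getD_eq_getElem?_getD, hj j hjd]
      have : (j < c + 1) ↔ (j < c) := by omega
      simp [this]

theorem loopA_inv (t : List String) (dl : Int) :
    ∀ c : Nat, 1 ≤ c → (c : Int) ≤ dl →
    InvA t dl.toNat c ((PySem.List.pyRange 1 (c : Int) 1).foldl (pvStepA t)
      (List.replicate dl.toNat (-1), -1)) := by
  intro c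
  induction c with
  | zero => intro h; omega
  | succ c ih =>
    intro _ hcle
    by_cases hc0 : c = 0
    · subst hc0
      rw [show (((0:Nat) + 1 : Nat) : Int) = 1 by norm_num,
        PySem.List.pyRange_one_eq_nil (le_refl 1), List.foldl_nil]
      refine ⟨by simp, by simp [pvMaxB_one], ?_⟩
      intro j hj
      rw [List.getD_eq_getElem?_getD, List.getElem?_replicate]
      by_cases hj1 : j < 1
      · have : j = 0 := by omega
        subst this
        simp [hj, pvMaxB_one]
      · simp [hj, hj1]
    · have hc1 : 1 ≤ c := by omega
      have hcast : ((c + 1 : Nat) : Int) = (c : Int) + 1 := by push_cast; ring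
      rw [hcast, PySem.List.pyRange_one_succ_right (by omega : (1:Int) ≤ (c:Int)),
        List.foldl_append, List.foldl_cons, List.foldl_nil]
      exact stepA_inv t dl.toNat c hc1 (by omega) _ (ih hc1 (by omega))

theorem sBridge (t : List String) (dl : Int) (hdl0 : 0 ≤ dl) (hdl : dl ≤ (t.length : Int))
    (j : Nat) (hj : j < dl.toNat) :
    (PySem.List.slice ((PySem.List.slice? t none none (-1)).getD []) none (some dl)).getD j ""
      = pvF t j := by
  rw [PySem.List.slice?_none_none_neg_one t]
  simp only [Option.getD_some]
  rw [PySem.List.slice_to _ hdl0]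
  rw [List.getD_eq_getElem?_getD, List.getElem?_take_of_lt hj,
    List.getElem?_reverse (by omega : j < t.length)]
  unfold pvF pvTok
  rw [List.getD_eq_getElem?_getD]
  congr 2
  omega

theorem checkEq (t s : List String) (d : Nat) (hs : ∀ j < d, s.getD j "" = pvF t j)
    (m p : Nat) (hp1 : 1 ≤ p) (hpm : p ≤ m) (hm : m ≤ d) :
    (((PySem.List.pyRange 0 ((m : Int) - (p : Int)) 1).all
      (fun j => s.getD j.toNat "" == s.getD (j + (p : Int)).toNat "")) = true)
      ↔ pvBrd t m (m - p) = true := by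
  rw [List.all_eq_true, pvBrd_iff]
  constructor
  · intro h
    refine ⟨by omega, fun j hj => ?_⟩
    have hmem : ((j : Int)) ∈ PySem.List.pyRange 0 ((m : Int) - (p : Int)) 1 := by
      rw [PySem.List.mem_pyRange_one]; omega
    have := h _ hmem
    simp only [beq_iff_eq] at this
    have e1 : ((j : Int)).toNat = j := by omega
    have e2 : ((j : Int) + (p : Int)).toNat = j + p := by omega
    rw [e1, e2] at this
    rw [hs j (by omega), hs (j + p) (by omega)] at this
    have e3 : m - (m - p) + j = j + p := by omega
    rw [e3]
    exact this
  · rintro ⟨-, h⟩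
    intro x hx
    rw [PySem.List.mem_pyRange_one] at hx
    simp only [beq_iff_eq]
    have e1 : x = ((x.toNat : Nat) : Int) := by omega
    have hxlt : x.toNat < m - p := by omega
    have e2 : (x + (p : Int)).toNat = x.toNat + p := by omega
    rw [e2, hs x.toNat (by omega), hs (x.toNat + p) (by omega)]
    have := h x.toNat hxlt
    have e3 : m - (m - p) + x.toNat = x.toNat + p := by omega
    rw [e3] at this
    exact this

theorem periodEq (t s : List String) (d : Nat) (hs : ∀ j < d, s.getD j "" = pvF t j)
    (m : Nat) (hm1 : 1 ≤ m) (hmd : m ≤ d) :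
    ∀ (q p : Nat), q = (m - pvMaxB t m) - p → 1 ≤ p → p ≤ m - pvMaxB t m →
    pvSmallestPeriod s (m : Int) (p : Int) = ((m - pvMaxB t m : Nat) : Int) := by
  have hmb := pvMaxB_lt t (show 0 < m by omega)
  intro q
  induction q with
  | zero =>
    intro p hq hp1 hple
    have hpeq : p = m - pvMaxB t m := by omega
    by_cases hpm : p < m
    · rw [pvSmallestPeriod, if_pos (by exact_mod_cast hpm)]
      rw [if_pos ?_]
      · exact_mod_cast congrArg (Nat.cast : Nat → Int) hpeq
      · rw [checkEq t s d hs m p hp1 (by omega) hmd]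
        rw [show m - p = pvMaxB t m by omega]
        exact pvMaxB_brd t (by omega)
    · rw [pvSmallestPeriod, if_neg (by exact_mod_cast hpm)]
      have : p = m := by omega
      omega
  | succ q ih =>
    intro p hq hp1 hple
    have hpm : p < m := by omega
    rw [pvSmallestPeriod, if_pos (by exact_mod_cast hpm)]
    rw [if_neg ?_]
    · have : ((p : Int) + 1) = ((p + 1 : Nat) : Int) := by push_cast; ring
      rw [this]
      exact ih (p + 1) (by omega) (by omega) (by omega)
    · intro hcheck
      rw [checkEq t s d hs m p hp1 (by omega) hmd] at hcheck
      have := pvMaxB_le hcheck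
      omega

theorem rangeShift (dl : Int) (h : 2 ≤ dl) :
    PySem.List.pyRange 3 (dl + 1) 1 = (PySem.List.pyRange 2 dl 1).map (· + 1) := by
  rw [PySem.List.pyRange_one, PySem.List.pyRange_one, List.map_map]
  rw [show (dl + 1 - 3).toNat = (dl - 2).toNat by omega]
  apply List.map_congr_left
  intro k _
  simp only [Function.comp_apply]
  ring

theorem foldl_ge_one_congr (f g : Int → Int → Int) (l : List Int)
    (h : ∀ a x, x ∈ l → 1 ≤ a → f a x = g a x ∧ 1 ≤ f a x) :
    ∀ a, 1 ≤ a → l.foldl f a = l.foldl g a := by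
  induction l with
  | nil => intros; rfl
  | cons x xs ih =>
    intro a ha
    rw [List.foldl_cons, List.foldl_cons]
    obtain ⟨he, hge⟩ := h a x (by simp) ha
    rw [← he]
    exact ih (fun a' x' hx' => h a' x' (by simp [hx'])) (f a x) (he ▸ hge)

theorem AB_eq (tokens : List String) (max_len : Int) :
    get_max_suffix_repeat_times_py tokens max_len
      = get_max_suffix_repeat_times_py_alt tokens max_len := by
  unfold get_max_suffix_repeat_times_py get_max_suffix_repeat_times_py_alt
  dsimp only
  set dl : Int := min max_len (tokens.length : Int) with hdldef
  by_cases hcase : dl ≤ 2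
  · rw [PySem.List.pyRange_one_eq_nil (by omega : dl ≤ 2),
      PySem.List.pyRange_one_eq_nil (by omega : dl + 1 ≤ 3)]
    rfl
  · push Not at hcase
    have hdl3 : 3 ≤ dl := hcase
    have hdln : dl ≤ (tokens.length : Int) := min_le_right _ _
    set d : Nat := dl.toNat with hddef
    have hdcast : (d : Int) = dl := by omega
    have hd3 : 3 ≤ d := by omega
    obtain ⟨hlen, hst2, hjv⟩ := hdcast ▸ loopA_inv tokens dl d (by omega) (by omega)
    set s := PySem.List.slice ((PySem.List.slice? tokens none none (-1)).getD [])
      none (some dl) with hsdef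
    have hs : ∀ j, j < d → s.getD j "" = pvF tokens j := fun j hj =>
      sBridge tokens dl (by omega) hdln j hj
    rw [rangeShift dl (by omega), List.foldl_map]
    apply foldl_ge_one_congr
    intro a i hi ha
    rw [PySem.List.mem_pyRange_one] at hi
    have hi2 : 2 ≤ i := hi.1
    have hidl : i < dl := hi.2
    set ci : Nat := i.toNat with hcidef
    have hci : (ci : Int) = i := by omega
    set m : Nat := ci + 1 with hmdef
    have hcid : ci < d := by omega
    have hni : (List.foldl (pvStepA tokens) (List.replicate d (-1), -1)
        (PySem.List.pyRange 1 dl 1)).1.getD i.toNat (-1) = (pvMaxB tokens m : Int) - 1 := by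
      rw [← hcidef, hjv ci (by omega), if_pos hcid]
    have hmcast : i + 1 = ((m : Nat) : Int) := by omega
    have hblt : pvMaxB tokens m < m := pvMaxB_lt tokens (by omega)
    set b : Nat := pvMaxB tokens m with hbdef
    set ps : Nat := m - b with hpsdef
    have hps1 : 1 ≤ ps := by omega
    have hperiod : pvSmallestPeriod s ((m : Nat) : Int) 1 = ((ps : Nat) : Int) := by
      have hp := periodEq tokens s d hs m (by omega) (by omega) (m - pvMaxB tokens m - 1) 1
        (by omega) (by omega) (by omega)
      rw [← hbdef] at hp
      rw [hpsdef]
      simpa using hp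
    constructor
    · -- step values agree
      dsimp only
      rw [hni, hmcast, hperiod]
      by_cases hb0 : b = 0
      · have hpsm : ps = m := by omega
        rw [if_neg (by rintro ⟨h1, -⟩; rw [hb0] at h1; simp at h1)]
        rw [hpsm, if_pos (by rw [PySem.Int.mod_natCast]; simp [Nat.mod_self])]
        rw [PySem.Int.floordiv_natCast, Nat.div_self (by omega)]
        exact (max_eq_left ha).symm
      · have hdiveq : i - ((pvMaxB tokens m : Int) - 1) = ((ps : Nat) : Int) := by
          rw [← hbdef]; omega
        rw [hdiveq]
        by_cases hdvd : PySem.Int.mod ((m : Nat) : Int) ((ps : Nat) : Int) = 0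
        · rw [if_pos ⟨by omega, hdvd⟩, if_pos hdvd]
        · rw [if_neg (by intro hc; exact hdvd hc.2), if_neg hdvd]
    · -- A's step keeps the accumulator ≥ 1
      dsimp only
      split
      · exact le_trans ha (le_max_left _ _)
      · exact ha
    · exact le_refl 1

-- ===== VERDICT (by name: the statement is the Claim_ definition above) =====
theorem get_max_suffix_repeat_times_py_spec : Claim_equal_get_max_suffix_repeat_times_py := by
  intro tokens max_len _
  unfold Spec_get_max_suffix_repeat_times_py
  exact AB_eq tokens max_len
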